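-- pv_equiv track=rewrite | github.com/moon4sake/codeforces | 1409E.py | solution
-- ===== SOURCE A (Python) =====
-- def solution(n, k, x, y):
--     x.sort()
--     l, r, a, b, c = [], [], 0, 0, 1
--     while b < n:
--         if c <= n - 1:
--             while x[c] - x[b] <= k:
--                 c += 1
--                 if c == n: break
--
--         while x[b] - x[a] > k:
--             a += 1
--
--         r.append(c - b)
--         l.append(b - a + 1)
--
--         b += 1
--
--     for i in range(1, n):
--         l[i] = max(l[i - 1], l[i])
--         r[n - 1 - i] = max(r[n - 1 - i], r[n - i])
--
--     max_ = l[0]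
--
--     for i in range(n - 1):
--         max_ = max(max_, l[i] + r[i + 1])
--
--     return max_
-- ===== SOURCE B (Python) =====
-- def solution(n, k, x, y):
--     # NOTE: like A, this sorts x in place (same observable side effect).
--     x.sort()
--
--     def first_ge(v):
--         # first index i in [0, n) with x[i] >= v (== bisect.bisect_left(x, v, 0, n))
--         lo, hi = 0, n
--         while lo < hi:
--             mid = (lo + hi) // 2
--             if x[mid] < v:
--                 lo = mid + 1
--             else:
--                 hi = mid
--         return lo
--
--     # for ints, bisect_right(x, v) == first_ge(v + 1)
--     l = [b - first_ge(x[b] - k) + 1 for b in range(n)]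
--     r = [first_ge(x[b] + k + 1) - b for b in range(n)]
--
--     for i in range(1, n):
--         l[i] = max(l[i - 1], l[i])
--     for i in range(1, n):
--         r[n - 1 - i] = max(r[n - 1 - i], r[n - i])
--
--     best = l[0]
--     for i in range(n - 1):
--         best = max(best, l[i] + r[i + 1])
--     return best
-- ===== Notes on version B (the rewrite author's own statement) =====
-- stated objective: alternative
-- what changed: Replaces A's non-resetting two-pointer sliding-window scan (with its break/guard state machine) by an independent hand-written binary search per point: l[b] and r[b] are computed as b - first_ge(x[b]-k) + 1 and first_ge(x[b]+k+1) - b on the sorted list, and A's single combined in-place pass over (l, r) becomes two separate passes.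
-- outside the precondition, e.g. on solution(1, -2, [0, 1, 3], []): A returns -1, B returns 0
import Mathlib
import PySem

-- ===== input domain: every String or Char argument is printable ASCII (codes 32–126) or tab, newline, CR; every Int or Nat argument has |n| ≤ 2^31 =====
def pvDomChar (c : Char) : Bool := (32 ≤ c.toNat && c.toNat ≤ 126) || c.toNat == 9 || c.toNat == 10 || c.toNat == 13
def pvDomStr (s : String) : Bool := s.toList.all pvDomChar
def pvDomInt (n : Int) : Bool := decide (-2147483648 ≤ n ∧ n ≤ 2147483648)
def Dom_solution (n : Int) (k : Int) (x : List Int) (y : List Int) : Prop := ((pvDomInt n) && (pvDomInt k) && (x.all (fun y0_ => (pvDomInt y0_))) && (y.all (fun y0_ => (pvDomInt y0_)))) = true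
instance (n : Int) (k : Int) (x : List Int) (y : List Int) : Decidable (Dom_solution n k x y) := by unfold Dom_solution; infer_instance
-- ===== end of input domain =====

-- B replaces A's non-resetting two-pointer window scan with a hand-written binary search per
-- point (objective: alternative / idiomatic; not faster — sorting dominates both).  Like A, B
-- sorts x in place (same observable side effect); the equivalence proved is about the return value.

-- ===== PORT A =====
-- inner 'while x[c] - x[b] <= k: c += 1; if c == n: break'  (fuel-totalized; Pre_ keeps reads in range)
def pvALoopC (xs : List Int) (k n xb : Int) : Nat → Int → Int
  | 0, c => c
  | f+1, c =>
    if PySem.List.pyGetD xs c 0 - xb ≤ k then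
      if c + 1 = n then c + 1 else pvALoopC xs k n xb f (c + 1)
    else c

-- inner 'while x[b] - x[a] > k: a += 1'
def pvALoopA (xs : List Int) (k xb : Int) : Nat → Int → Int
  | 0, a => a
  | f+1, a =>
    if k < xb - PySem.List.pyGetD xs a 0 then pvALoopA xs k xb f (a + 1) else a

-- outer 'while b < n' loop carrying (b, a, c, l, r)
def pvALoopB (xs : List Int) (k n : Int) : Nat → Int → Int → Int → List Int → List Int → List Int × List Int
  | 0, _, _, _, l, r => (l, r)
  | f+1, b, a, c, l, r =>
    if b < n then
      let c' := if c ≤ n - 1 then pvALoopC xs k n (PySem.List.pyGetD xs b 0) (xs.length + 1) c else c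
      let a' := pvALoopA xs k (PySem.List.pyGetD xs b 0) (xs.length + 1) a
      pvALoopB xs k n f (b + 1) a' c' (l ++ [b - a' + 1]) (r ++ [c' - b])
    else (l, r)

def solution (n : Int) (k : Int) (x : List Int) (y : List Int) : Int :=
  let xs := PySem.List.sorted x (fun v => v) false
  let lr := pvALoopB xs k n n.toNat 0 0 1 [] []
  -- for i in range(1, n): l[i] = max(l[i-1], l[i]); r[n-1-i] = max(r[n-1-i], r[n-i])
  let lr2 := (PySem.List.pyRange 1 n 1).foldl (fun (st : List Int × List Int) i =>
      (PySem.List.pySetD st.1 i (max (PySem.List.pyGetD st.1 (i - 1) 0) (PySem.List.pyGetD st.1 i 0)),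
       PySem.List.pySetD st.2 (n - 1 - i) (max (PySem.List.pyGetD st.2 (n - 1 - i) 0) (PySem.List.pyGetD st.2 (n - i) 0)))) lr
  -- max_ = l[0]; for i in range(n-1): max_ = max(max_, l[i] + r[i+1])
  (PySem.List.pyRange 0 (n - 1) 1).foldl
    (fun m i => max m (PySem.List.pyGetD lr2.1 i 0 + PySem.List.pyGetD lr2.2 (i + 1) 0))
    (PySem.List.pyGetD lr2.1 0 0)

-- ===== PORT B =====
-- 'first_ge(v)': binary search for the first index i in [0, n) with x[i] >= v
def pvBSearch (xs : List Int) (v : Int) : Nat → Int → Int → Int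
  | 0, lo, _ => lo
  | f+1, lo, hi =>
    if lo < hi then
      let mid := PySem.Int.floordiv (lo + hi) 2
      if PySem.List.pyGetD xs mid 0 < v then pvBSearch xs v f (mid + 1) hi
      else pvBSearch xs v f lo mid
    else lo

def solution_alt (n : Int) (k : Int) (x : List Int) (y : List Int) : Int :=
  let xs := PySem.List.sorted x (fun v => v) false
  let l := (PySem.List.pyRange 0 n 1).map (fun b => b - pvBSearch xs (PySem.List.pyGetD xs b 0 - k) n.toNat 0 n + 1)
  let r := (PySem.List.pyRange 0 n 1).map (fun b => pvBSearch xs (PySem.List.pyGetD xs b 0 + k + 1) n.toNat 0 n - b)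
  let l2 := (PySem.List.pyRange 1 n 1).foldl (fun l i =>
      PySem.List.pySetD l i (max (PySem.List.pyGetD l (i - 1) 0) (PySem.List.pyGetD l i 0))) l
  let r2 := (PySem.List.pyRange 1 n 1).foldl (fun r i =>
      PySem.List.pySetD r (n - 1 - i) (max (PySem.List.pyGetD r (n - 1 - i) 0) (PySem.List.pyGetD r (n - i) 0))) r
  (PySem.List.pyRange 0 (n - 1) 1).foldl
    (fun m i => max m (PySem.List.pyGetD l2 i 0 + PySem.List.pyGetD r2 (i + 1) 0))
    (PySem.List.pyGetD l2 0 0)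

-- ===== PRECONDITION & SPEC =====
-- Pre_ excludes: n = 0 and n > len(x), where A raises IndexError; and k < 0, where A either
-- raises IndexError (its left pointer runs past the array) or returns accidental nonpositive
-- window sizes from the overrun pointer — a degenerate regime (segments of negative length)
-- nobody specifies.
def Pre_solution (n : Int) (k : Int) (x : List Int) (y : List Int) : Prop :=
  1 ≤ n ∧ n ≤ (x.length : Int) ∧ 0 ≤ k
instance (n : Int) (k : Int) (x : List Int) (y : List Int) : Decidable (Pre_solution n k x y) := by unfold Pre_solution; infer_instance

def pvWitness_solution : Int × Int × List Int × List Int := (2, 1, [3, 1], [0])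

def Spec_solution (n : Int) (k : Int) (x : List Int) (y : List Int) (out : Int) : Prop := out = solution_alt n k x y
instance (n : Int) (k : Int) (x : List Int) (y : List Int) (out : Int) : Decidable (Spec_solution n k x y out) := by unfold Spec_solution; infer_instance

-- ===== CLAIM (what is proved, stated in full; the proofs are below) =====
def Claim_equal_solution : Prop := ∀ (n : Int) (k : Int) (x : List Int) (y : List Int), Dom_solution n k x y → Pre_solution n k x y → Spec_solution n k x y (solution n k x y)
-- ===== LEMMAS AND PROOFS =====

-- number of elements of the first m slots of xs that are < t, as an Int
def pvCnt (xs : List Int) (m : Nat) (t : Int) : Int :=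
  ((xs.take m).countP (fun e => decide (e < t)) : Nat)

lemma pvCnt_nonneg (xs : List Int) (m : Nat) (t : Int) : 0 ≤ pvCnt xs m t := by
  simp [pvCnt]

lemma pvCnt_le (xs : List Int) (m : Nat) (t : Int) (hm : m ≤ xs.length) :
    pvCnt xs m t ≤ (m : Int) := by
  have h1 : (xs.take m).countP (fun e => decide (e < t)) ≤ (xs.take m).length :=
    List.countP_le_length
  have h2 : (xs.take m).length = m := by simp [List.length_take]; omega
  simp [pvCnt]; omega

lemma pvCnt_mono (xs : List Int) (m : Nat) {t1 t2 : Int} (h : t1 ≤ t2) :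
    pvCnt xs m t1 ≤ pvCnt xs m t2 := by
  have := List.countP_mono_left (l := xs.take m)
    (p := fun e => decide (e < t1)) (q := fun e => decide (e < t2))
    (by intro a _ ha; simp at ha ⊢; omega)
  simp [pvCnt]; omega

-- characterisation on a sorted list: position i is < t  iff  i < count of elements < t
lemma pvCnt_char_aux (p : List Int) (hs : p.Pairwise (· ≤ ·)) (t : Int) :
    ∀ i (h : i < p.length), (p[i] < t ↔ (i : Int) < (p.countP (fun e => decide (e < t)) : Nat)) := by
  induction p with
  | nil => intro i h; simp at h
  | cons a tl ih =>
    rw [List.pairwise_cons] at hs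
    obtain ⟨hale, htl⟩ := hs
    intro i h
    rw [List.countP_cons]
    by_cases hat : a < t
    · cases i with
      | zero => simp [hat]
      | succ j =>
        have := ih htl j (by simpa using h)
        simp only [List.getElem_cons_succ, hat]
        simp at this ⊢
        omega
    · have hz : tl.countP (fun e => decide (e < t)) = 0 := by
        rw [List.countP_eq_zero]
        intro e he
        have := hale e he
        simp; omega
      cases i with
      | zero => simp [hat, hz]
      | succ j =>
        have hj : j < tl.length := by simpa using h
        have hmem : tl[j] ∈ tl := List.getElem_mem hj
        have := hale _ hmem
        simp only [List.getElem_cons_succ, hz, hat]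
        simp
        omega

lemma pvCnt_char (xs : List Int) (hs : xs.Pairwise (· ≤ ·)) (m : Nat) (hm : m ≤ xs.length)
    (t : Int) (i : Nat) (hi : i < m) :
    (xs[i]'(by omega) < t ↔ (i : Int) < pvCnt xs m t) := by
  have hsp : (xs.take m).Pairwise (· ≤ ·) := hs.sublist (List.take_sublist m xs)
  have hlen : i < (xs.take m).length := by simp [List.length_take]; omega
  have := pvCnt_char_aux (xs.take m) hsp t i hlen
  rw [List.getElem_take] at this
  exact this

-- the a-pointer loop lands exactly on the count
lemma pvALoopA_eq (xs : List Int) (hs : xs.Pairwise (· ≤ ·)) (m : Nat) (hm : m ≤ xs.length)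
    (k xb : Int) :
    ∀ (f : Nat) (a : Int), 0 ≤ a → a ≤ pvCnt xs m (xb - k) → pvCnt xs m (xb - k) < (m : Int) →
      (pvCnt xs m (xb - k) - a).toNat ≤ f →
      pvALoopA xs k xb f a = pvCnt xs m (xb - k) := by
  intro f
  induction f with
  | zero => intro a ha hle hlt hf; simp only [pvALoopA]; omega
  | succ f ih =>
    intro a ha hle hlt hf
    by_cases hcase : a < pvCnt xs m (xb - k)
    · have hanat : a.toNat < m := by omega
      have hget : PySem.List.pyGetD xs a 0 = xs[a.toNat]'(by omega) :=
        PySem.List.pyGetD_eq_getElem xs 0 ha (by omega)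
      have hchar := pvCnt_char xs hs m hm (xb - k) a.toNat hanat
      have hcond : xs[a.toNat]'(by omega) < xb - k := hchar.mpr (by omega)
      simp only [pvALoopA, hget, if_pos (show k < xb - xs[a.toNat]'(by omega) by omega)]
      exact ih (a + 1) (by omega) (by omega) hlt (by omega)
    · have heq : a = pvCnt xs m (xb - k) := by omega
      have hanat : a.toNat < m := by omega
      have hget : PySem.List.pyGetD xs a 0 = xs[a.toNat]'(by omega) :=
        PySem.List.pyGetD_eq_getElem xs 0 ha (by omega)
      have hchar := pvCnt_char xs hs m hm (xb - k) a.toNat hanat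
      have hcond : ¬ xs[a.toNat]'(by omega) < xb - k := by
        intro hlt'
        have := hchar.mp hlt'
        omega
      simp only [pvALoopA, hget, if_neg (show ¬ k < xb - xs[a.toNat]'(by omega) by omega)]
      omega

-- the c-pointer loop (with its break at n) lands exactly on the count
lemma pvALoopC_eq (xs : List Int) (hs : xs.Pairwise (· ≤ ·)) (m : Nat) (hm : m ≤ xs.length)
    (k xb : Int) :
    ∀ (f : Nat) (c : Int), 0 ≤ c → c ≤ pvCnt xs m (xb + k + 1) → c ≤ (m : Int) - 1 →
      (pvCnt xs m (xb + k + 1) - c).toNat ≤ f →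
      pvALoopC xs k (m : Int) xb f c = pvCnt xs m (xb + k + 1) := by
  have hcle : pvCnt xs m (xb + k + 1) ≤ (m : Int) := pvCnt_le xs m _ hm
  intro f
  induction f with
  | zero => intro c hc hle hcm hf; simp only [pvALoopC]; omega
  | succ f ih =>
    intro c hc hle hcm hf
    have hcnat : c.toNat < m := by omega
    have hget : PySem.List.pyGetD xs c 0 = xs[c.toNat]'(by omega) :=
      PySem.List.pyGetD_eq_getElem xs 0 hc (by omega)
    have hchar := pvCnt_char xs hs m hm (xb + k + 1) c.toNat hcnat
    by_cases hcase : c < pvCnt xs m (xb + k + 1)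
    · have hcond : xs[c.toNat]'(by omega) < xb + k + 1 := hchar.mpr (by omega)
      simp only [pvALoopC, hget, if_pos (show xs[c.toNat]'(by omega) - xb ≤ k by omega)]
      by_cases hbreak : c + 1 = (m : Int)
      · rw [if_pos hbreak]; omega
      · rw [if_neg hbreak]
        exact ih (c + 1) (by omega) (by omega) (by omega) (by omega)
    · have hcond : ¬ xs[c.toNat]'(by omega) < xb + k + 1 := by
        intro hlt'
        have := hchar.mp hlt'
        omega
      simp only [pvALoopC, hget, if_neg (show ¬ xs[c.toNat]'(by omega) - xb ≤ k by omega)]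
      omega

-- the binary search lands exactly on the count
lemma pvBSearch_eq (xs : List Int) (hs : xs.Pairwise (· ≤ ·)) (m : Nat) (hm : m ≤ xs.length)
    (v : Int) :
    ∀ (f : Nat) (lo hi : Int), 0 ≤ lo → lo ≤ pvCnt xs m v → pvCnt xs m v ≤ hi → hi ≤ (m : Int) →
      (hi - lo).toNat ≤ f →
      pvBSearch xs v f lo hi = pvCnt xs m v := by
  intro f
  induction f with
  | zero => intro lo hi hlo hle1 hle2 hhi hf; simp only [pvBSearch]; omega
  | succ f ih =>
    intro lo hi hlo hle1 hle2 hhi hf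
    by_cases hlh : lo < hi
    · have hmid := PySem.Int.floordiv_two_mid_bounds (le_of_lt hlh)
      have hmidhi : PySem.Int.floordiv (lo + hi) 2 < hi := by
        rw [PySem.Int.floordiv_lt_iff_lt_mul (by omega)]
        omega
      set mid := PySem.Int.floordiv (lo + hi) 2 with hmiddef
      have hmnat : mid.toNat < m := by omega
      have hget : PySem.List.pyGetD xs mid 0 = xs[mid.toNat]'(by omega) :=
        PySem.List.pyGetD_eq_getElem xs 0 (by omega) (by omega)
      have hchar := pvCnt_char xs hs m hm v mid.toNat hmnat
      by_cases hcase : mid < pvCnt xs m v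
      · have hcond : xs[mid.toNat]'(by omega) < v := hchar.mpr (by omega)
        simp only [pvBSearch, if_pos hlh, ← hmiddef, hget, if_pos hcond]
        exact ih (mid + 1) hi (by omega) (by omega) hle2 hhi (by omega)
      · have hcond : ¬ xs[mid.toNat]'(by omega) < v := by
          intro hlt'
          have := hchar.mp hlt'
          omega
        simp only [pvBSearch, if_pos hlh, ← hmiddef, hget, if_neg hcond]
        exact ih lo mid hlo hle1 (by omega) (by omega) (by omega)
    · simp only [pvBSearch, if_neg hlh]
      omega

-- the outer loop of A produces exactly the per-point count lists
lemma pvALoopB_eq (xs : List Int) (hs : xs.Pairwise (· ≤ ·)) (m : Nat) (hm : m ≤ xs.length)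
    (k : Int) (hk : 0 ≤ k) :
    ∀ (f b : Nat) (a c : Int) (l r : List Int), b + f = m →
      0 ≤ a → 1 ≤ c →
      (b < m → a ≤ pvCnt xs m (PySem.List.pyGetD xs b 0 - k) ∧
               c ≤ pvCnt xs m (PySem.List.pyGetD xs b 0 + k + 1)) →
      pvALoopB xs k (m : Int) f (b : Int) a c l r =
        (l ++ (PySem.List.pyRange (b : Int) (m : Int) 1).map
            (fun i => i - pvCnt xs m (PySem.List.pyGetD xs i 0 - k) + 1),
         r ++ (PySem.List.pyRange (b : Int) (m : Int) 1).map
            (fun i => pvCnt xs m (PySem.List.pyGetD xs i 0 + k + 1) - i)) := by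
  intro f
  induction f with
  | zero =>
    intro b a c l r hbf ha hc hinv
    have hbm : (b : Int) = (m : Int) := by omega
    simp only [pvALoopB, hbm, PySem.List.pyRange_one_eq_nil (le_refl (m : Int)),
      List.map_nil, List.append_nil]
  | succ f ih =>
    intro b a c l r hbf ha hc hinv
    have hbm : b < m := by omega
    obtain ⟨ha2, hc2⟩ := hinv hbm
    have hblen : b < xs.length := by omega
    have hget : PySem.List.pyGetD xs (b : Int) 0 = xs[b] :=
      PySem.List.pyGetD_eq_getElem xs 0 (by omega) (by omega)
    have hcharA := pvCnt_char xs hs m hm (PySem.List.pyGetD xs (b : Int) 0 - k) b hbm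
    have hcharC := pvCnt_char xs hs m hm (PySem.List.pyGetD xs (b : Int) 0 + k + 1) b hbm
    have hcntAle : pvCnt xs m (PySem.List.pyGetD xs (b : Int) 0 - k) ≤ (b : Int) := by
      by_contra hlt
      have := hcharA.mpr (by omega)
      rw [hget] at this
      omega
    have hcntCgt : (b : Int) < pvCnt xs m (PySem.List.pyGetD xs (b : Int) 0 + k + 1) :=
      hcharC.mp (by rw [hget]; omega)
    have hcntCle : pvCnt xs m (PySem.List.pyGetD xs (b : Int) 0 + k + 1) ≤ (m : Int) :=
      pvCnt_le xs m _ hm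
    have hcntAnn := pvCnt_nonneg xs m (PySem.List.pyGetD xs (b : Int) 0 - k)
    have ha' : pvALoopA xs k (PySem.List.pyGetD xs (b : Int) 0) (xs.length + 1) a =
        pvCnt xs m (PySem.List.pyGetD xs (b : Int) 0 - k) :=
      pvALoopA_eq xs hs m hm k _ (xs.length + 1) a ha ha2 (by omega) (by omega)
    have hc' : (if c ≤ (m : Int) - 1 then
          pvALoopC xs k (m : Int) (PySem.List.pyGetD xs (b : Int) 0) (xs.length + 1) c else c) =
        pvCnt xs m (PySem.List.pyGetD xs (b : Int) 0 + k + 1) := by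
      by_cases hg : c ≤ (m : Int) - 1
      · rw [if_pos hg]
        exact pvALoopC_eq xs hs m hm k _ (xs.length + 1) c (by omega) hc2 hg (by omega)
      · rw [if_neg hg]
        omega
    have hnext : b + 1 < m →
        pvCnt xs m (PySem.List.pyGetD xs (b : Int) 0 - k) ≤
          pvCnt xs m (PySem.List.pyGetD xs ((b : Int) + 1) 0 - k) ∧
        pvCnt xs m (PySem.List.pyGetD xs (b : Int) 0 + k + 1) ≤
          pvCnt xs m (PySem.List.pyGetD xs ((b : Int) + 1) 0 + k + 1) := by
      intro hb1
      have hget1 : PySem.List.pyGetD xs ((b : Int) + 1) 0 = xs[b + 1]'(by omega) := by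
        have : ((b : Int) + 1) = ((b + 1 : Nat) : Int) := by omega
        rw [this]
        exact PySem.List.pyGetD_eq_getElem xs 0 (by omega) (by omega)
      have hmono : xs[b] ≤ xs[b + 1]'(by omega) :=
        List.pairwise_iff_getElem.mp hs b (b + 1) (by omega) (by omega) (by omega)
      rw [hget, hget1]
      exact ⟨pvCnt_mono xs m (by omega), pvCnt_mono xs m (by omega)⟩
    have hrec := ih (b + 1)
      (pvCnt xs m (PySem.List.pyGetD xs (b : Int) 0 - k))
      (pvCnt xs m (PySem.List.pyGetD xs (b : Int) 0 + k + 1))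
      (l ++ [(b : Int) - pvCnt xs m (PySem.List.pyGetD xs (b : Int) 0 - k) + 1])
      (r ++ [pvCnt xs m (PySem.List.pyGetD xs (b : Int) 0 + k + 1) - (b : Int)])
      (by omega) (by omega) (by omega)
      (by
        intro hb1
        have := hnext hb1
        push_cast
        push_cast at this
        exact this)
    push_cast at hrec
    simp only [pvALoopB, if_pos (show (b : Int) < (m : Int) by omega), ha', hc']
    rw [hrec]
    rw [PySem.List.pyRange_one_cons (show (b : Int) < (m : Int) by omega)]
    simp only [List.map_cons]
    simp

-- ===== VERDICT (by name: the statement is the Claim_ definition above) =====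
theorem solution_spec : Claim_equal_solution := by
  intro n k x y _ hpre
  unfold Pre_solution at hpre
  obtain ⟨hn1, hnlen, hk⟩ := hpre
  unfold Spec_solution solution solution_alt
  set xs := PySem.List.sorted x (fun v => v) false with hxs
  have hs : xs.Pairwise (· ≤ ·) := by
    simpa using PySem.List.sorted_pairwise x (fun v => v)
  have hlen : xs.length = x.length := PySem.List.length_sorted x _ _
  set m := n.toNat with hmdef
  have hn : n = (m : Int) := by omega
  have hmlen : m ≤ xs.length := by omega
  have hchar0 := pvCnt_char xs hs m hmlen (PySem.List.pyGetD xs ((0 : Nat) : Int) 0 + k + 1) 0 (by omega)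
  have hget0 : PySem.List.pyGetD xs ((0 : Nat) : Int) 0 = xs[0]'(by omega) :=
    PySem.List.pyGetD_eq_getElem xs 0 (by omega) (by omega)
  have hc1 : (1 : Int) ≤ pvCnt xs m (PySem.List.pyGetD xs ((0 : Nat) : Int) 0 + k + 1) := by
    have := hchar0.mp (by rw [hget0]; omega)
    omega
  have hA : pvALoopB xs k n m 0 0 1 [] [] =
      ((PySem.List.pyRange 0 n).map (fun i => i - pvCnt xs m (PySem.List.pyGetD xs i 0 - k) + 1),
       (PySem.List.pyRange 0 n).map (fun i => pvCnt xs m (PySem.List.pyGetD xs i 0 + k + 1) - i)) := by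
    rw [hn]
    have := pvALoopB_eq xs hs m hmlen k hk m 0 0 1 [] [] (by omega) (by omega) (by omega)
      (by
        intro _
        exact ⟨pvCnt_nonneg xs m _, hc1⟩)
    simpa using this
  have hBl : (PySem.List.pyRange 0 n).map
        (fun b => b - pvBSearch xs (PySem.List.pyGetD xs b 0 - k) m 0 n + 1) =
      (PySem.List.pyRange 0 n).map (fun i => i - pvCnt xs m (PySem.List.pyGetD xs i 0 - k) + 1) := by
    apply List.map_congr_left
    intro b hb
    rw [PySem.List.mem_pyRange_one] at hb
    rw [pvBSearch_eq xs hs m hmlen _ m 0 n (by omega) (pvCnt_nonneg xs m _)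
      (by rw [hn]; exact pvCnt_le xs m _ hmlen) (by omega) (by omega)]
  have hBr : (PySem.List.pyRange 0 n).map
        (fun b => pvBSearch xs (PySem.List.pyGetD xs b 0 + k + 1) m 0 n - b) =
      (PySem.List.pyRange 0 n).map (fun i => pvCnt xs m (PySem.List.pyGetD xs i 0 + k + 1) - i) := by
    apply List.map_congr_left
    intro b hb
    rw [PySem.List.mem_pyRange_one] at hb
    rw [pvBSearch_eq xs hs m hmlen _ m 0 n (by omega) (pvCnt_nonneg xs m _)
      (by rw [hn]; exact pvCnt_le xs m _ hmlen) (by omega) (by omega)]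
  simp only [hA, hBl, hBr]
  rw [PySem.List.foldl_prod_mk
    (fun l i => PySem.List.pySetD l i (max (PySem.List.pyGetD l (i - 1) 0) (PySem.List.pyGetD l i 0)))
    (fun r i => PySem.List.pySetD r (n - 1 - i) (max (PySem.List.pyGetD r (n - 1 - i) 0) (PySem.List.pyGetD r (n - i) 0)))]
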